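-- pv_equiv track=rewrite | github.com/jkvasnicka/LCIA-QSAR-Model | lcia_qsar/plot.py | group_model_keys
-- ===== SOURCE A (Python) =====
-- import itertools
--
-- def group_model_keys(
--         model_keys,
--         key_names,
--         exclusion_key_names ,
--         string_to_exclude=None
--     ):
--     '''
--     Group model keys by grouping keys. A grouping key is formed by taking a model
--     key and excluding one or more of its elements.
--
--     Parameters
--     ----------
--     model_keys : list of tuples
--         Model keys to be grouped. Each tuple represents a model key.
--     key_names : list
--         Names of keys corresponding to elements in the model keys. The order of
--         names should match the order of elements in each tuple of model_keys.
--     exclusion_key_names  : str or list of str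
--         Names of keys (which should be in key_names) to exclude when forming
--         the grouping key.
--     string_to_exclude : str, optional
--         String to exclude model keys containing it. If a model key contains this
--         string, it will be excluded from the final output. If None, no model keys
--         are excluded based on this criterion.
--
--     Returns
--     -------
--     grouped_model_keys : list of 2-tuple
--         Contains each grouping key and its corresponding group of model keys.
--     '''
--
--     # Convert exclusion_key_names  to list if it's a string
--     if isinstance(exclusion_key_names , str):
--         exclusion_key_names  = [exclusion_key_names ]
--
--     # Exclude model keys that contain string_to_exclude
--     if string_to_exclude:
--         model_keys = [k for k in model_keys if string_to_exclude not in k]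
--
--     # Get the indices of the keys to exclude in the key names
--     exclusion_key_indices = [key_names.index(key) for key in exclusion_key_names ]
--
--     def create_grouping_key(model_key):
--         return tuple(item for idx, item in enumerate(model_key)
--                      if idx not in exclusion_key_indices)
--
--     # Sort model keys by grouping key
--     # This is necessary because itertools.groupby() groups only consecutive
--     # elements with the same key
--     sorted_model_keys = sorted(model_keys, key=create_grouping_key)
--
--     # Group the sorted keys by grouping key
--     grouped_model_keys = [
--         (grouping_key, list(group))
--         for grouping_key, group in itertools.groupby(
--         sorted_model_keys, key=create_grouping_key)
--     ]
--
--     return grouped_model_keys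
-- ===== SOURCE B (Python) =====
-- def group_model_keys(
--         model_keys,
--         key_names,
--         exclusion_key_names,
--         string_to_exclude=None
--     ):
--     '''One pass: bucket model keys by grouping key in a dict (insertion order,
--     so each group keeps the original relative order exactly as a stable sort
--     would), then sort only the distinct grouping keys.'''
--     if isinstance(exclusion_key_names, str):
--         exclusion_key_names = [exclusion_key_names]
--
--     exclusion_key_indices = [key_names.index(key) for key in exclusion_key_names]
--
--     buckets = {}
--     for model_key in model_keys:
--         if not (string_to_exclude and string_to_exclude in model_key):
--             grouping_key = tuple(
--                 item for idx, item in enumerate(model_key)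
--                 if idx not in exclusion_key_indices)
--             buckets.setdefault(grouping_key, []).append(model_key)
--
--     return [(grouping_key, buckets[grouping_key])
--             for grouping_key in sorted(buckets)]
-- ===== Notes on version B (the rewrite author's own statement) =====
-- stated objective: faster
-- what changed: A sorts the whole filtered list by grouping key and then runs itertools.groupby over consecutive runs; B makes a single bucketing pass into a dict keyed by grouping key (insertion order preserves each group's original order, exactly as the stable sort does) and then sorts only the distinct grouping keys.
import Mathlib
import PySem

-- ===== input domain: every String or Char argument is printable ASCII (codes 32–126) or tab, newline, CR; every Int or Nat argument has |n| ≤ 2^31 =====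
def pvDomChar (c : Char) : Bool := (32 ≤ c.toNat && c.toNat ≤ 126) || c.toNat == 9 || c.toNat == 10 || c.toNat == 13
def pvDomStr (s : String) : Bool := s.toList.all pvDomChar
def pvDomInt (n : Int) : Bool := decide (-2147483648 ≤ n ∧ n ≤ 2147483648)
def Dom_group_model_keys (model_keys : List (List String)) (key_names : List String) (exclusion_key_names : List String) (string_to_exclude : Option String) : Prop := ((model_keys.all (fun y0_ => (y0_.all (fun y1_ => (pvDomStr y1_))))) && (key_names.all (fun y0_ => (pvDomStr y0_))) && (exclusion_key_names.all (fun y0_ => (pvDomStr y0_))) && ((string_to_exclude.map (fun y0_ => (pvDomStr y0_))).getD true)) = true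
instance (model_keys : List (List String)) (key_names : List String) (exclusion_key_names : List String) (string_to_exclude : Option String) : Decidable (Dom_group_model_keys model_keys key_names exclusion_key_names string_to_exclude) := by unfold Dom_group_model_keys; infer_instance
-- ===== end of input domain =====

-- B replaces A's sort-the-whole-list-then-groupby with a single bucketing pass over a dict
-- followed by a sort of only the distinct grouping keys (objective: faster; measured so in a timing run).

-- Shared helpers: both Pythons compute the same grouping key and the same truthiness test.
-- create_grouping_key(model_key): elements whose index is not among the excluded indices
def pvGroupKey (idxs : List Int) (mk : List String) : List String :=
  ((PySem.List.enumerate mk).filter (fun p => !(idxs.contains p.1))).map (·.2)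

-- sorted(xs, key=key); the instance arguments are pinned to the (defeq) projections of the
-- LinearOrder instance so that PySem's order lemmas apply syntactically
def pvSortByKey {α κ : Type} [inst : LinearOrder κ] (xs : List α) (key : α → κ) : List α :=
  @PySem.List.sorted α κ
    (@Preorder.toLT κ (@PartialOrder.toPreorder κ (@LinearOrder.toPartialOrder κ inst)))
    (@LinearOrder.toDecidableLT κ inst) xs key false

-- ===== PORT A =====
-- itertools.groupby(zs, key): consecutive runs of equal key
def pvGroupby {α κ : Type} [BEq κ] (key : α → κ) : List α → List (κ × List α)
  | [] => []
  | x :: rest =>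
    (key x, x :: rest.takeWhile (fun y => key y == key x)) ::
      pvGroupby key (rest.dropWhile (fun y => key y == key x))
termination_by zs => zs.length
decreasing_by simpa using Nat.lt_succ_of_le (List.length_dropWhile_le _ rest)

def group_model_keys (model_keys : List (List String)) (key_names : List String) (exclusion_key_names : List String) (string_to_exclude : Option String) : List (List String × List (List String)) :=
  -- if string_to_exclude:  (truthy = some non-empty string)
  let mks := match string_to_exclude with
    | some s => if s = "" then model_keys else model_keys.filter (fun mk => !(mk.contains s))
    | none => model_keys
  -- [key_names.index(key) for key in exclusion_key_names]; Pre_ guarantees every index? is some,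
  -- so filterMap equals the Python list (Python raises ValueError outside Pre_)
  let idxs := exclusion_key_names.filterMap (fun key => (PySem.List.index? key_names key).map (fun n => (n : Int)))
  pvGroupby (pvGroupKey idxs) (pvSortByKey mks (pvGroupKey idxs))

-- ===== PORT B =====
-- not (string_to_exclude and string_to_exclude in model_key)
def pvKeep : Option String → List String → Bool
  | none, _ => true
  | some s, mk => if s = "" then true else !(mk.contains s)

def group_model_keys_alt (model_keys : List (List String)) (key_names : List String) (exclusion_key_names : List String) (string_to_exclude : Option String) : List (List String × List (List String)) :=
  let idxs := exclusion_key_names.filterMap (fun key => (PySem.List.index? key_names key).map (fun n => (n : Int)))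
  -- buckets.setdefault(gk, []).append(mk)  =  modify gk [] (· ++ [mk])
  let buckets : PySem.Dict (List String) (List (List String)) :=
    model_keys.foldl (fun d mk =>
      if pvKeep string_to_exclude mk then d.modify (pvGroupKey idxs mk) [] (· ++ [mk]) else d)
      PySem.Dict.empty
  (pvSortByKey buckets.keys (fun k => k)).map (fun gk => (gk, buckets.getD gk []))

-- ===== PRECONDITION & SPEC =====
-- Pre_ excludes exactly the inputs on which A raises: key_names.index(key) raises ValueError
-- when some exclusion key name is not in key_names.
def Pre_group_model_keys (model_keys : List (List String)) (key_names : List String) (exclusion_key_names : List String) (string_to_exclude : Option String) : Prop :=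
  ∀ name ∈ exclusion_key_names, name ∈ key_names
instance (model_keys : List (List String)) (key_names : List String) (exclusion_key_names : List String) (string_to_exclude : Option String) : Decidable (Pre_group_model_keys model_keys key_names exclusion_key_names string_to_exclude) := by unfold Pre_group_model_keys; infer_instance

def pvWitness_group_model_keys : List (List String) × List String × List String × Option String :=
  ([["a", "x"], ["b", "x"], ["a", "y"]], ["k1", "k2"], ["k2"], none)

def Spec_group_model_keys (model_keys : List (List String)) (key_names : List String) (exclusion_key_names : List String) (string_to_exclude : Option String) (out : List (List String × List (List String))) : Prop := out = group_model_keys_alt model_keys key_names exclusion_key_names string_to_exclude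
instance (model_keys : List (List String)) (key_names : List String) (exclusion_key_names : List String) (string_to_exclude : Option String) (out : List (List String × List (List String))) : Decidable (Spec_group_model_keys model_keys key_names exclusion_key_names string_to_exclude out) := by unfold Spec_group_model_keys; infer_instance

-- ===== CLAIM (what is proved, stated in full; the proofs are below) =====
def Claim_equal_group_model_keys : Prop := ∀ (model_keys : List (List String)) (key_names : List String) (exclusion_key_names : List String) (string_to_exclude : Option String), Dom_group_model_keys model_keys key_names exclusion_key_names string_to_exclude → Pre_group_model_keys model_keys key_names exclusion_key_names string_to_exclude → Spec_group_model_keys model_keys key_names exclusion_key_names string_to_exclude (group_model_keys model_keys key_names exclusion_key_names string_to_exclude)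

-- ===== LEMMAS AND PROOFS =====

-- A's up-front filter is the same list as B's in-loop test
lemma pvFilter_keep (model_keys : List (List String)) (string_to_exclude : Option String) :
    (match string_to_exclude with
      | some s => if s = "" then model_keys else model_keys.filter (fun mk => !(mk.contains s))
      | none => model_keys) = model_keys.filter (pvKeep string_to_exclude) := by
  cases string_to_exclude with
  | none => exact (List.filter_eq_self.mpr (fun mk _ => rfl)).symm
  | some s =>
    show (if s = "" then model_keys else model_keys.filter (fun mk => !(mk.contains s))) = _
    by_cases hs : s = ""
    · rw [if_pos hs]
      exact (List.filter_eq_self.mpr (fun mk _ => by simp [pvKeep, hs])).symm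
    · rw [if_neg hs]
      exact List.filter_congr (fun mk _ => by simp [pvKeep, hs])

-- inserting x into a key-sorted list: the key-k elements of the result
lemma pvInsertBy_filter {α κ : Type} [LinearOrder κ] [BEq κ] [LawfulBEq κ]
    (g : α → κ) (k : κ) (x : α) (acc : List α) (h : acc.Pairwise (fun a b => g a ≤ g b)) :
    (PySem.List.insertBy (fun a b => decide (g a < g b)) x acc).filter (fun y => g y == k) =
      acc.filter (fun y => g y == k) ++ if g x == k then [x] else [] := by
  induction acc with
  | nil =>
    by_cases hx : g x == k <;> simp [PySem.List.insertBy, hx]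
  | cons y t ih =>
    rw [List.pairwise_cons] at h
    obtain ⟨hy, ht⟩ := h
    by_cases hlt : g x < g y
    · simp only [PySem.List.insertBy, decide_eq_true_eq, if_pos hlt]
      by_cases hx : g x == k
      · -- every element of y :: t has key > g x = k, so its filter is empty
        have hxk : g x = k := by simpa using hx
        have hnil : (y :: t).filter (fun y => g y == k) = [] := by
          rw [List.filter_eq_nil_iff]
          intro z hz
          have hyz : g y ≤ g z := by
            rcases List.mem_cons.mp hz with rfl | hz'
            · exact le_refl _
            · exact hy z hz'
          have : k < g z := lt_of_lt_of_le (hxk ▸ hlt) hyz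
          simp [ne_of_gt this]
        rw [hnil]
        simp [hnil, hx]
      · simp [List.filter_cons, hx]
    · simp only [PySem.List.insertBy, decide_eq_true_eq, if_neg hlt]
      rw [List.filter_cons, List.filter_cons, ih ht]
      by_cases hyk : g y == k <;> simp [hyk]

-- STABILITY of Python's sort: the key-k elements keep their original order
lemma pvSorted_filter_key {α κ : Type} [LinearOrder κ] [BEq κ] [LawfulBEq κ]
    (g : α → κ) (k : κ) (xs : List α) :
    (pvSortByKey xs g).filter (fun y => g y == k) = xs.filter (fun y => g y == k) := by
  unfold pvSortByKey
  induction xs using List.reverseRecOn with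
  | nil => rw [PySem.List.sorted_eq_foldl_insertBy]; simp
  | append_singleton l x ih =>
    rw [PySem.List.sorted_eq_foldl_insertBy, List.foldl_append, List.foldl_cons, List.foldl_nil,
      ← PySem.List.sorted_eq_foldl_insertBy,
      pvInsertBy_filter g k x _ (PySem.List.sorted_pairwise l g), ih, List.filter_append]
    by_cases hx : g x == k <;> simp [hx]

lemma pvDedup_sublist {α : Type} [BEq α] [LawfulBEq α] (l : List α) :
    (PySem.List.dedup l).Sublist l := by
  simp only [PySem.List.dedup_eq_ofList]
  induction l with
  | nil => simp [PySem.Set.ofList]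
  | cons x xs ih =>
    rw [PySem.Set.ofList_cons]
    exact List.Sublist.cons₂ x (List.filter_sublist.trans ih)

lemma pvDiscard_ofList_append {α : Type} [BEq α] [LawfulBEq α] (k : α) (l1 l2 : List α)
    (h1 : ∀ a ∈ l1, a = k) (h2 : k ∉ l2) :
    PySem.Set.discard (PySem.Set.ofList (l1 ++ l2)) k = PySem.Set.ofList l2 := by
  induction l1 with
  | nil =>
    simp only [List.nil_append, PySem.Set.discard]
    exact List.filter_eq_self.mpr (fun a ha => by
      have : a ∈ l2 := by simpa [PySem.Set.mem_ofList] using ha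
      simp [ne_eq]
      exact fun h => h2 (h ▸ this))
  | cons a l1 ih =>
    have hak : a = k := h1 a (List.mem_cons_self ..)
    subst hak
    rw [List.cons_append, PySem.Set.ofList_cons]
    simp only [PySem.Set.discard, List.filter_cons]
    rw [List.filter_filter]
    simp only [beq_self_eq_true, Bool.not_true, Bool.and_self]
    exact ih (fun b hb => h1 b (List.mem_cons_of_mem _ hb))

lemma pvDropWhile_head_false {α : Type} (p : α → Bool) (l : List α) (x : α) (r : List α)
    (h : l.dropWhile p = x :: r) : p x = false := by
  induction l with
  | nil => simp at h
  | cons a l ih =>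
    rw [List.dropWhile_cons] at h
    by_cases hpa : p a = true
    · rw [if_pos hpa] at h; exact ih h
    · rw [if_neg hpa] at h
      injection h with h1 _
      subst h1
      simpa using hpa

-- groupby over a key-sorted list = first-occurrence-distinct keys paired with their filters
lemma pvGroupby_char {α κ : Type} [LinearOrder κ] [BEq κ] [LawfulBEq κ] (g : α → κ) :
    ∀ (n : Nat) (zs : List α), zs.length ≤ n → zs.Pairwise (fun a b => g a ≤ g b) →
    pvGroupby g zs =
      (PySem.List.dedup (zs.map g)).map (fun k => (k, zs.filter (fun x => g x == k))) := by
  intro n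
  induction n with
  | zero =>
    intro zs hlen _
    have : zs = [] := List.length_eq_zero_iff.mp (Nat.le_zero.mp hlen)
    subst this
    simp [pvGroupby, PySem.List.dedup_eq_ofList, PySem.Set.ofList]
  | succ m ih =>
    intro zs hlen hp
    match zs with
    | [] => simp [pvGroupby, PySem.List.dedup_eq_ofList, PySem.Set.ofList]
    | x :: rest =>
      rw [pvGroupby]
      have hrest_ge : ∀ y ∈ rest, g x ≤ g y := (List.pairwise_cons.mp hp).1
      have hpair_rest : rest.Pairwise (fun a b => g a ≤ g b) := (List.pairwise_cons.mp hp).2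
      have htmem : ∀ y ∈ rest.takeWhile (fun y => g y == g x), g y = g x :=
        fun y hy => by simpa using List.mem_takeWhile_imp hy
      have hd_gt : ∀ z ∈ rest.dropWhile (fun y => g y == g x), g x < g z := by
        cases hd : rest.dropWhile (fun y => g y == g x) with
        | nil => simp
        | cons w d' =>
          have hw_ne : (g w == g x) = false := pvDropWhile_head_false _ rest w d' hd
          have hw_mem : w ∈ rest :=
            (List.dropWhile_sublist _).subset (hd ▸ List.mem_cons_self ..)
          have hw_gt : g x < g w :=
            lt_of_le_of_ne (hrest_ge w hw_mem) (fun h => by simp [h.symm] at hw_ne)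
          intro z hz
          rcases List.mem_cons.mp hz with rfl | hz'
          · exact hw_gt
          · have hsub : (w :: d').Sublist rest := hd ▸ List.dropWhile_sublist _
            have hpwd : (w :: d').Pairwise (fun a b => g a ≤ g b) := hpair_rest.sublist hsub
            exact lt_of_lt_of_le hw_gt ((List.pairwise_cons.mp hpwd).1 z hz')
      have hpair_d : (rest.dropWhile (fun y => g y == g x)).Pairwise (fun a b => g a ≤ g b) :=
        hpair_rest.sublist (List.dropWhile_sublist _)
      have hlen_d : (rest.dropWhile (fun y => g y == g x)).length ≤ m :=
        le_trans (List.length_dropWhile_le _ _) (Nat.le_of_succ_le_succ hlen)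
      have ihd := ih (rest.dropWhile (fun y => g y == g x)) hlen_d hpair_d
      have hrest_eq : rest.takeWhile (fun y => g y == g x) ++ rest.dropWhile (fun y => g y == g x) = rest :=
        List.takeWhile_append_dropWhile
      have hfilter_t : (rest.takeWhile (fun y => g y == g x)).filter (fun y => g y == g x) =
          rest.takeWhile (fun y => g y == g x) :=
        List.filter_eq_self.mpr (fun y hy => by simp [htmem y hy])
      have hfilter_d : (rest.dropWhile (fun y => g y == g x)).filter (fun y => g y == g x) = [] :=
        List.filter_eq_nil_iff.mpr (fun z hz => by simp [ne_of_gt (hd_gt z hz)])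
      have hfilter_rest : List.filter (fun y => g y == g x) rest =
          rest.takeWhile (fun y => g y == g x) := by
        have h5 := congrArg (List.filter (fun y => g y == g x)) hrest_eq
        rw [List.filter_append, hfilter_t, hfilter_d, List.append_nil] at h5
        exact h5.symm
      have hfilter_zs : (x :: rest).filter (fun y => g y == g x) =
          x :: rest.takeWhile (fun y => g y == g x) := by
        rw [List.filter_cons]
        simp [hfilter_rest]
      have hknotind : g x ∉ (rest.dropWhile (fun y => g y == g x)).map g := by
        intro hmem
        rcases List.mem_map.mp hmem with ⟨z, hz, hgz⟩
        exact absurd hgz.symm (ne_of_gt (hd_gt z hz)).symm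
      have hmapg : (rest.takeWhile (fun y => g y == g x)).map g ++
          (rest.dropWhile (fun y => g y == g x)).map g = rest.map g := by
        rw [← List.map_append, hrest_eq]
      have hded : PySem.List.dedup ((x :: rest).map g) =
          g x :: PySem.List.dedup ((rest.dropWhile (fun y => g y == g x)).map g) := by
        rw [List.map_cons, ← hmapg, PySem.List.dedup_eq_ofList, PySem.Set.ofList_cons,
          pvDiscard_ofList_append (g x) _ _
            (fun a ha => by rcases List.mem_map.mp ha with ⟨y, hy, rfl⟩; exact htmem y hy)
            hknotind,
          ← PySem.List.dedup_eq_ofList]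
      rw [hded, List.map_cons, hfilter_zs.symm, ihd]
      refine congrArg₂ _ rfl ?_
      refine List.map_congr_left (fun k' hk' => ?_)
      have hk'mem : k' ∈ (rest.dropWhile (fun y => g y == g x)).map g := by
        simpa [PySem.List.mem_dedup] using hk'
      rcases List.mem_map.mp hk'mem with ⟨z0, hz0, rfl⟩
      have hk'_gt : g x < g z0 := hd_gt z0 hz0
      refine congrArg₂ _ rfl ?_
      have h1 : (g x == g z0) = false := by simp [ne_of_lt hk'_gt]
      have h2 : (rest.takeWhile (fun y => g y == g x)).filter (fun y => g y == g z0) = [] :=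
        List.filter_eq_nil_iff.mpr (fun y hy => by simp [htmem y hy, ne_of_lt hk'_gt])
      have h6 := congrArg (List.filter (fun y => g y == g z0)) hrest_eq
      rw [List.filter_append, h2, List.nil_append] at h6
      rw [List.filter_cons, h1]
      simp [h6]

-- distinct keys of the sorted list, in order = sorted distinct keys
lemma pvDedup_sorted_map {α κ : Type} [LinearOrder κ] [BEq κ] [LawfulBEq κ]
    (xs : List α) (g : α → κ) :
    PySem.List.dedup ((pvSortByKey xs g).map g) =
      pvSortByKey (PySem.Set.ofList (xs.map g)) (fun k => k) := by
  unfold pvSortByKey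
  refine (PySem.List.sorted_eq_of_perm_of_pairwise_lt (PySem.Set.ofList (xs.map g))
    (PySem.List.dedup ((PySem.List.sorted xs g).map g)) (fun k => k) ?_ ?_).symm
  · refine (List.perm_ext_iff_of_nodup (PySem.List.nodup_dedup _) (PySem.Set.nodup_ofList _)).mpr ?_
    intro a
    simp [PySem.Set.mem_ofList, List.mem_map, PySem.List.mem_sorted]
  · have h1 : ((PySem.List.sorted xs g).map g).Pairwise (· ≤ ·) :=
      PySem.List.sorted_map_key_pairwise xs g
    have h2 : (PySem.List.dedup ((PySem.List.sorted xs g).map g)).Pairwise (· ≤ ·) :=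
      h1.sublist (pvDedup_sublist _)
    have h3 : (PySem.List.dedup ((PySem.List.sorted xs g).map g)).Pairwise (· ≠ ·) :=
      PySem.List.nodup_dedup _
    exact (h2.and h3).imp (fun h => lt_of_le_of_ne h.1 h.2)

lemma pvBuckets_keys (ys : List (List String)) (g : List String → List String) :
    (ys.foldl (fun d mk => d.modify (g mk) [] (· ++ [mk])) PySem.Dict.empty).keys
      = PySem.Set.ofList (ys.map g) := by
  rw [PySem.Dict.keys_foldl_modify_key ys g [] (fun _ mk => (· ++ [mk]))]
  simp [PySem.Dict.keys_empty, PySem.Set.update_nil_left]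

lemma pvBuckets_getD (ys : List (List String)) (g : List String → List String) (c : List String) :
    (ys.foldl (fun d mk => d.modify (g mk) [] (· ++ [mk])) PySem.Dict.empty).getD c []
      = ys.filter (fun mk => g mk == c) := by
  rw [← List.foldl_map (f := fun mk => (g mk, mk))
    (g := fun d p => PySem.Dict.modify d p.1 [] (· ++ [p.2])),
    PySem.Dict.getD_foldl_modify_append]
  simp [PySem.Dict.getD_empty, List.filter_map, List.map_map, Function.comp_def]

lemma pvSortByKey_pairwise {α κ : Type} [LinearOrder κ] (xs : List α) (key : α → κ) :
    (pvSortByKey xs key).Pairwise (fun a b => key a ≤ key b) :=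
  PySem.List.sorted_pairwise xs key

-- B in closed form
lemma pvAlt_normal (model_keys : List (List String)) (key_names : List String)
    (exclusion_key_names : List String) (string_to_exclude : Option String) :
    group_model_keys_alt model_keys key_names exclusion_key_names string_to_exclude =
      (pvSortByKey (PySem.Set.ofList ((model_keys.filter (pvKeep string_to_exclude)).map
          (pvGroupKey (exclusion_key_names.filterMap (fun key => (PySem.List.index? key_names key).map (fun n => (n : Int)))))))
        (fun k => k)).map
        (fun k => (k, (model_keys.filter (pvKeep string_to_exclude)).filter
          (fun mk => pvGroupKey (exclusion_key_names.filterMap (fun key => (PySem.List.index? key_names key).map (fun n => (n : Int)))) mk == k))) := by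
  simp only [group_model_keys_alt]
  rw [PySem.List.foldl_if_eq_foldl_filter]
  simp only [pvBuckets_keys, pvBuckets_getD]

-- ===== VERDICT (by name: the statement is the Claim_ definition above) =====
theorem group_model_keys_spec : Claim_equal_group_model_keys := by
  unfold Claim_equal_group_model_keys
  intro model_keys key_names exclusion_key_names string_to_exclude _ _
  unfold Spec_group_model_keys
  rw [pvAlt_normal]
  simp only [group_model_keys]
  rw [pvFilter_keep]
  rw [pvGroupby_char _ _ _ le_rfl (pvSortByKey_pairwise _ _)]
  rw [pvDedup_sorted_map]
  refine List.map_congr_left (fun k _ => ?_)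
  rw [pvSorted_filter_key]
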